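-- pv_equiv track=rewrite | github.com/Joshua-Korn/Algorithms-by-Language- | Python/arrays1.py | skyline_heights
-- ===== SOURCE A (Python) =====
-- def skyline_heights(heights):
--     max_height = 0
--     visible_heights = []
--     for height in heights:
--         if height > max_height:
--             visible_heights.append(height)
--             max_height = height
--     return visible_heights
-- ===== SOURCE B (Python) =====
-- from itertools import accumulate
--
-- def skyline_heights(heights):
--     prefix = list(accumulate(heights, max, initial=0))
--     return [b for a, b in zip(prefix, prefix[1:]) if b > a]
-- ===== Notes on version B (the rewrite author's own statement) =====
-- stated objective: alternative
-- what changed: B materialises the full prefix-maximum table (accumulate with max, seeded 0) and then emits the successor at each strict-increase point of adjacent prefix values, instead of A's single loop with a scalar running max and conditional append.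
import Mathlib
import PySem

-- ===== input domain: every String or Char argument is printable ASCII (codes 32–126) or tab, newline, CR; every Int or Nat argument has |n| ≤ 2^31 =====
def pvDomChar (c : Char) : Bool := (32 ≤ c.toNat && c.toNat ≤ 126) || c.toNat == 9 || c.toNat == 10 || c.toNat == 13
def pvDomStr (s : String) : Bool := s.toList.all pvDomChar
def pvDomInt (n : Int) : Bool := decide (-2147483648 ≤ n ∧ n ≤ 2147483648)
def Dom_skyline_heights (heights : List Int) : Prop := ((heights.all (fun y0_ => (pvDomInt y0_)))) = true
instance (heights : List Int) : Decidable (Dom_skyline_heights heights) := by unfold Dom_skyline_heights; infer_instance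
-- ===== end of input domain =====

-- B materialises the prefix-maximum table and emits adjacent strict increases, instead of A's single loop with a scalar running max.

-- ===== PORT A =====
def skyline_heights (heights : List Int) : List Int :=
  (heights.foldl
    (fun (st : Int × List Int) height =>
      if height > st.1 then (height, st.2 ++ [height]) else st)
    (0, [])).2

-- ===== PORT B =====
def skyline_heights_alt (heights : List Int) : List Int :=
  let pre := List.scanl max 0 heights
  ((pre.zip pre.tail).filter (fun p => p.2 > p.1)).map (fun p => p.2)

-- ===== PRECONDITION & SPEC =====
def Spec_skyline_heights (heights : List Int) (out : List Int) : Prop := out = skyline_heights_alt heights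
instance (heights : List Int) (out : List Int) : Decidable (Spec_skyline_heights heights out) := by unfold Spec_skyline_heights; infer_instance

-- ===== CLAIM (what is proved, stated in full; the proofs are below) =====
def Claim_equal_skyline_heights : Prop := ∀ (heights : List Int), Dom_skyline_heights heights → Spec_skyline_heights heights (skyline_heights heights)

-- ===== LEMMAS AND PROOFS =====

def pvG (m : Int) (t : List Int) : List Int :=
  (((List.scanl max m t).zip (List.scanl max m t).tail).filter
      (fun p => p.2 > p.1)).map (fun p => p.2)

theorem pvG_cons (m h : Int) (t : List Int) :
    pvG m (h :: t) = (if h > m then [h] else []) ++ pvG (max m h) t := by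
  cases t with
  | nil =>
    by_cases hm : h > m
    · have hmax : max m h = h := by omega
      simp [pvG, List.scanl_cons, List.scanl_nil, hmax, hm]
    · have hmax : max m h = m := by omega
      simp [pvG, List.scanl_cons, List.scanl_nil, hmax, hm]
  | cons a t2 =>
    by_cases hm : h > m
    · have hmax : max m h = h := by omega
      simp only [pvG, List.scanl_cons, List.tail_cons, List.zip_cons_cons,
        List.filter_cons, hmax]
      simp [hm]
    · have hmax : max m h = m := by omega
      simp only [pvG, List.scanl_cons, List.tail_cons, List.zip_cons_cons,
        List.filter_cons, hmax]
      simp [hm]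

theorem skyline_key :
    ∀ (heights : List Int) (m : Int) (acc : List Int),
      (heights.foldl
        (fun (st : Int × List Int) height =>
          if height > st.1 then (height, st.2 ++ [height]) else st)
        (m, acc)).2
      = acc ++ pvG m heights := by
  intro heights
  induction heights with
  | nil => intro m acc; simp [pvG, List.scanl_nil]
  | cons h t ih =>
    intro m acc
    rw [List.foldl_cons, pvG_cons]
    by_cases hm : h > m
    · have hmax : max m h = h := by omega
      simp [hm, hmax, ih]
    · have hmax : max m h = m := by omega
      simp [hm, hmax, ih]

-- ===== VERDICT (by name: the statement is the Claim_ definition above) =====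
theorem skyline_heights_spec : Claim_equal_skyline_heights := by
  intro heights _
  unfold Spec_skyline_heights skyline_heights skyline_heights_alt
  simpa [pvG] using skyline_key heights 0 []
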